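-- pv_equiv track=rewrite | github.com/YunTianZhou/LeetcodeContest | Weekly Contest/Weekly Contest 468/3690. Split and Merge Array Transformation.py | minSplitMerge
-- ===== SOURCE A (Python) =====
-- from typing import List
-- from collections import deque
--
-- def minSplitMerge(nums1: List[int], nums2: List[int]) -> int:
--     n = len(nums1)
--     nums1 = tuple(nums1)
--     nums2 = tuple(nums2)
--
--     def nxt(state):
--         for l in range(n):
--             for r in range(l, n):
--                 move = state[l: r + 1]
--                 leave = state[: l] + state[r + 1: ]
--
--                 for k in range(len(leave) + 1):
--                     yield leave[: k] + move + leave[k: ]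
--
--     dq = deque([nums1])
--     visit = {nums1}
--     ans = 0
--
--     while dq:
--         for _ in range(len(dq)):
--             state = dq.popleft()
--             if state == nums2:
--                 return ans
--             for nstate in nxt(state):
--                 if nstate not in visit:
--                     dq.append(nstate)
--                     visit.add(nstate)
--         ans += 1
--
--     return -1
-- ===== SOURCE B (Python) =====
-- from typing import List
--
-- def minSplitMerge(nums1: List[int], nums2: List[int]) -> int:
--     n = len(nums1)
--     src, tgt = tuple(nums1), tuple(nums2)
--
--     def expand(ball):
--         # closed ball: every state of `ball` plus everything one block-move away
--         out = set(ball)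
--         for s in ball:
--             for length in range(1, n + 1):
--                 for l in range(n - length + 1):
--                     block = s[l:l + length]
--                     rest = s[:l] + s[l + length:]
--                     for k in range(n - length + 1):
--                         out.add(rest[:k] + block + rest[k:])
--         return out
--
--     # Bidirectional BFS: a block move is reversible (move the block back), so the
--     # distance is the first d = i + j at which ball_i(src) meets ball_j(tgt).
--     # Grow closed balls around src and tgt alternately; if the ball about to be
--     # grown is already closed under moves, the two components never meet.
--     front, back = {src}, {tgt}
--     d = 0
--     while True:
--         if front & back:
--             return d
--         new = expand(front)
--         if len(new) == len(front):
--             return -1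
--         front, back = back, new
--         d += 1
-- ===== Notes on version B (the rewrite author's own statement) =====
-- stated objective: alternative
-- what changed: Replaces one-directional level BFS from nums1 (deque + visited set, per-state target test) by bidirectional BFS meeting in the middle: closed balls are grown alternately around nums1 and nums2 (block moves are reversible), the distance is the first d = i + j at which the two balls intersect, and -1 is returned as soon as the ball about to be grown is closed under moves.
import Mathlib
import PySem

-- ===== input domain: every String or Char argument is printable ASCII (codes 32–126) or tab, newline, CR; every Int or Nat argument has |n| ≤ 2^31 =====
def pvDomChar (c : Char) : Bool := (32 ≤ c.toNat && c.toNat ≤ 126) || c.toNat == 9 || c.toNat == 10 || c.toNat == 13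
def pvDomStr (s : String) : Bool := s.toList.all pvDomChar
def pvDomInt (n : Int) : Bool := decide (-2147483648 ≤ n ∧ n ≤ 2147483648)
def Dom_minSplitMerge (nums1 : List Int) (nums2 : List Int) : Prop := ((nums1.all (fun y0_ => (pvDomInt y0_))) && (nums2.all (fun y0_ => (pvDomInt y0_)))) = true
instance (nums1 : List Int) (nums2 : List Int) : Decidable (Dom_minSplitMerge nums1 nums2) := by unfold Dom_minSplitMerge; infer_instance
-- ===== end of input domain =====

-- B replaces A's one-directional level BFS by bidirectional BFS meeting in the middle
-- (block moves are reversible): closed balls grown alternately around nums1 and nums2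
-- meet at distance d = i + j. Same return value, proved equal.

-- ===== PORT A =====
-- nxt(state): for l, for r in range(l, n), move = state[l:r+1], leave = state[:l]+state[r+1:],
-- yield leave[:k]+move+leave[k:]. Slices have nonnegative bounds, so xs[a:b] = (xs.drop a).take (b-a)
-- exactly (PySem.List.slice_natCast); range(l, n) is (List.range (n-l)).map (l + ·).
def nxtA (n : Nat) (state : List Int) : List (List Int) :=
  (List.range n).flatMap fun l =>
    ((List.range (n - l)).map (l + ·)).flatMap fun r =>
      let move := (state.drop l).take (r + 1 - l)
      let leave := state.take l ++ state.drop (r + 1)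
      (List.range (leave.length + 1)).map fun k =>
        leave.take k ++ move ++ leave.drop k

-- the inner "for nstate in nxt(state): if nstate not in visit: dq.append(nstate); visit.add(nstate)"
def pushA : List (List Int) → List (List Int) → PySem.Set (List Int) → List (List Int) × PySem.Set (List Int)
  | [], acc, visit => (acc, visit)
  | t :: ts, acc, visit =>
    if PySem.Set.contains visit t then pushA ts acc visit
    else pushA ts (acc ++ [t]) (PySem.Set.add visit t)

-- "for _ in range(len(dq)): state = dq.popleft(); if state == nums2: return ans; …"
-- (none = the early `return ans`; acc collects the states appended for the next level)
def levelA (n : Nat) (nums2 : List Int) : List (List Int) → List (List Int) → PySem.Set (List Int) → Option (List (List Int) × PySem.Set (List Int))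
  | [], acc, visit => some (acc, visit)
  | s :: rest, acc, visit =>
    if s = nums2 then none
    else
      let p := pushA (nxtA n s) acc visit
      levelA n nums2 rest p.1 p.2

-- "while dq: … ans += 1; return -1"; the Nat fuel is only a totality guard: each level's deque
-- holds distinct, newly-visited permutations of nums1, so at most n! + 1 iterations ever run.
def loopA (n : Nat) (nums2 : List Int) : Nat → List (List Int) → PySem.Set (List Int) → Int → Int
  | 0, _, _, _ => -1
  | fuel + 1, dq, visit, ans =>
    if dq = [] then -1
    else
      match levelA n nums2 dq [] visit with
      | none => ans
      | some p => loopA n nums2 fuel p.1 p.2 (ans + 1)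

def minSplitMerge (nums1 : List Int) (nums2 : List Int) : Int :=
  let n := nums1.length
  loopA n nums2 (n.factorial + 2) [nums1] (PySem.Set.ofList [nums1]) 0

-- ===== PORT B =====
-- expand's inner loops: for length in range(1, n+1), for l in range(n-length+1),
-- block = s[l:l+length], rest = s[:l]+s[l+length:], for k in range(n-length+1):
-- rest[:k]+block+rest[k:]; slices via drop/take (nonnegative bounds, exact by PySem.List.slice_natCast)
def movesB (n : Nat) (s : List Int) : List (List Int) :=
  (List.range n).flatMap fun L =>
    let len := L + 1
    (List.range (n - len + 1)).flatMap fun l =>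
      let block := (s.drop l).take len
      let rest := s.take l ++ s.drop (l + len)
      (List.range (n - len + 1)).map fun k =>
        rest.take k ++ block ++ rest.drop k

-- "out = set(ball); for s in ball: … out.add(…); return out"
def expandB (n : Nat) (ball : PySem.Set (List Int)) : PySem.Set (List Int) :=
  ball.foldl (fun out s => (movesB n s).foldl PySem.Set.add out) ball

-- "while True: if front & back: return d; new = expand(front);
--  if len(new) == len(front): return -1; front, back = back, new; d += 1"
-- (the Nat fuel is only a totality guard: every non-returning iteration strictly grows
--  one of the two balls, and each ball holds distinct permutations of its endpoint)
def loopBid (n : Nat) : Nat → PySem.Set (List Int) → PySem.Set (List Int) → Int → Int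
  | 0, _, _, _ => -1
  | fuel + 1, front, back, d =>
    if (PySem.Set.inter front back).isEmpty then
      let nw := expandB n front
      if nw.length = front.length then -1
      else loopBid n fuel back nw (d + 1)
    else d

def minSplitMerge_alt (nums1 : List Int) (nums2 : List Int) : Int :=
  let n := nums1.length
  loopBid n (2 * (nums1.length.factorial + nums2.length.factorial) + 4)
    (PySem.Set.ofList [nums1]) (PySem.Set.ofList [nums2]) 0

-- ===== PRECONDITION & SPEC =====
def Spec_minSplitMerge (nums1 : List Int) (nums2 : List Int) (out : Int) : Prop := out = minSplitMerge_alt nums1 nums2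
instance (nums1 : List Int) (nums2 : List Int) (out : Int) : Decidable (Spec_minSplitMerge nums1 nums2 out) := by unfold Spec_minSplitMerge; infer_instance

-- ===== CLAIM (what is proved, stated in full; the proofs are below) =====
def Claim_equal_minSplitMerge : Prop := ∀ (nums1 : List Int) (nums2 : List Int), Dom_minSplitMerge nums1 nums2 → Spec_minSplitMerge nums1 nums2 (minSplitMerge nums1 nums2)


-- ===== LEMMAS AND PROOFS =====

-- splitting a list at a block: s = s[:l] + s[l:l+len] + s[l+len:]
lemma split3 (s : List Int) (l len : Nat) :
    s.take l ++ (s.drop l).take len ++ s.drop (l + len) = s := by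
  rw [← List.drop_drop, List.append_assoc, List.take_append_drop, List.take_append_drop]

-- reinserting a block anywhere is a permutation of block-in-front
lemma perm_block (u m : List Int) (k : Nat) :
    (u.take k ++ m ++ u.drop k).Perm (m ++ u) := by
  have h1 : (u.take k ++ m ++ u.drop k).Perm ((m ++ u.take k) ++ u.drop k) :=
    List.perm_append_comm.append_right _
  have h2 : (m ++ u.take k) ++ u.drop k = m ++ u := by
    rw [List.append_assoc, List.take_append_drop]
  exact h2 ▸ h1

-- membership characterisation of A's move list
lemma mem_nxtA (n : Nat) (state t : List Int) :
    t ∈ nxtA n state ↔ ∃ l r k, l ≤ r ∧ r < n ∧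
      k ≤ (state.take l ++ state.drop (r + 1)).length ∧
      t = (state.take l ++ state.drop (r + 1)).take k ++ ((state.drop l).take (r + 1 - l))
          ++ (state.take l ++ state.drop (r + 1)).drop k := by
  simp only [nxtA, List.mem_flatMap, List.mem_map, List.mem_range]
  constructor
  · rintro ⟨l, hl, r, ⟨d, hd, rfl⟩, k, hk, rfl⟩
    exact ⟨l, l + d, k, by omega, by omega, by omega, rfl⟩
  · rintro ⟨l, r, k, hlr, hrn, hk, rfl⟩
    exact ⟨l, by omega, r, ⟨r - l, by omega, by omega⟩, k, by omega, rfl⟩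

-- membership characterisation of B's move list (for length-n states): same moves as A's
lemma mem_movesB (n : Nat) (state t : List Int) (hs : state.length = n) :
    t ∈ movesB n state ↔ t ∈ nxtA n state := by
  rw [mem_nxtA]
  simp only [movesB, List.mem_flatMap, List.mem_map, List.mem_range]
  constructor
  · rintro ⟨L, hL, l, hl, k, hk, rfl⟩
    refine ⟨l, l + L, k, by omega, by omega, ?_, ?_⟩
    · simp only [List.length_append, List.length_take, List.length_drop]; omega
    · have h1 : l + L + 1 - l = L + 1 := by omega
      have h2 : l + L + 1 = l + (L + 1) := by omega
      rw [h1, h2]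
  · rintro ⟨l, r, k, hlr, hrn, hk, rfl⟩
    have hlen : (state.take l ++ state.drop (r + 1)).length = n - (r + 1 - l) := by
      simp only [List.length_append, List.length_take, List.length_drop]; omega
    refine ⟨r - l, by omega, l, by omega, k, by omega, ?_⟩
    have h1 : r - l + 1 = r + 1 - l := by omega
    rw [h1]
    have h2 : l + (r + 1 - l) = r + 1 := by omega
    rw [h2]

-- moves preserve the length
lemma length_of_mem_nxtA (n : Nat) (state t : List Int) (hs : state.length = n)
    (ht : t ∈ nxtA n state) : t.length = n := by
  rw [mem_nxtA] at ht
  obtain ⟨l, r, k, hlr, hrn, hk, rfl⟩ := ht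
  simp only [List.length_append, List.length_take, List.length_drop]
  omega

-- moves preserve the multiset of entries
lemma perm_of_mem_nxtA (n : Nat) (s t : List Int) (ht : t ∈ nxtA n s) : t.Perm s := by
  rw [mem_nxtA] at ht
  obtain ⟨l, r, k, hlr, hrn, hk, rfl⟩ := ht
  refine (perm_block _ _ k).trans ?_
  have h1 : (s.drop l).take (r + 1 - l) ++ (s.take l ++ s.drop (r + 1))
      = ((s.drop l).take (r + 1 - l) ++ s.take l) ++ s.drop (r + 1) := by
    rw [List.append_assoc]
  have h2 : (((s.drop l).take (r + 1 - l) ++ s.take l) ++ s.drop (r + 1)).Perm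
      ((s.take l ++ (s.drop l).take (r + 1 - l)) ++ s.drop (r + 1)) :=
    List.perm_append_comm.append_right _
  have h3 : (s.take l ++ (s.drop l).take (r + 1 - l)) ++ s.drop (r + 1) = s := by
    have h4 := split3 s l (r + 1 - l)
    rw [show l + (r + 1 - l) = r + 1 from by omega] at h4
    exact h4
  rw [h1]
  conv_rhs => rw [← h3]
  exact h2

lemma perm_of_mem_movesB (n : Nat) (s t : List Int) (ht : t ∈ movesB n s) : t.Perm s := by
  simp only [movesB, List.mem_flatMap, List.mem_map, List.mem_range] at ht
  obtain ⟨L, hL, l, hl, k, hk, rfl⟩ := ht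
  refine (perm_block _ _ k).trans ?_
  have h1 : (s.drop l).take (L + 1) ++ (s.take l ++ s.drop (l + (L + 1)))
      = ((s.drop l).take (L + 1) ++ s.take l) ++ s.drop (l + (L + 1)) := by
    rw [List.append_assoc]
  have h2 : (((s.drop l).take (L + 1) ++ s.take l) ++ s.drop (l + (L + 1))).Perm
      ((s.take l ++ (s.drop l).take (L + 1)) ++ s.drop (l + (L + 1))) :=
    List.perm_append_comm.append_right _
  have h3 : (s.take l ++ (s.drop l).take (L + 1)) ++ s.drop (l + (L + 1)) = s :=
    split3 s l (L + 1)
  rw [h1]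
  conv_rhs => rw [← h3]
  exact h2

-- moving the one-element block s[0:1] back to position 0 leaves s unchanged
lemma nxtA_self (n : Nat) (s : List Int) (hn : 0 < n) (_hs : s.length = n) :
    s ∈ nxtA n s := by
  rw [mem_nxtA]
  refine ⟨0, 0, 0, le_refl 0, hn, Nat.zero_le _, ?_⟩
  simp only [List.take_zero, List.nil_append, List.drop_zero, Nat.zero_add, Nat.sub_zero,
    List.take_append_drop]

-- a block move is reversible by another block move
lemma mem_nxtA_symm (n : Nat) (s t : List Int) (hs : s.length = n)
    (ht : t ∈ nxtA n s) : s ∈ nxtA n t := by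
  rw [mem_nxtA] at ht
  obtain ⟨l, r, k, hlr, hrn, hk, rfl⟩ := ht
  set m := (s.drop l).take (r + 1 - l) with hm
  set u := s.take l ++ s.drop (r + 1) with hu
  have hul : u.length = n - (r + 1 - l) := by
    simp only [hu, List.length_append, List.length_take, List.length_drop]; omega
  have hml : m.length = r + 1 - l := by
    simp only [hm, List.length_take, List.length_drop]; omega
  have hkl : (u.take k).length = k := by
    rw [List.length_take]; omega
  have htk : (u.take k ++ m ++ u.drop k).take k = u.take k := by
    rw [List.append_assoc]; exact List.take_left' hkl
  have hkm : (u.take k ++ m).length = k + (r + 1 - l) := by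
    rw [List.length_append, hkl, hml]
  have htd : (u.take k ++ m ++ u.drop k).drop (k + (r + 1 - l)) = u.drop k :=
    List.drop_left' hkm
  have htm : ((u.take k ++ m ++ u.drop k).drop k).take (r + 1 - l) = m := by
    rw [List.append_assoc, List.drop_left' hkl]
    exact List.take_left' hml
  rw [mem_nxtA]
  refine ⟨k, k + (r - l), l, by omega, by omega, ?_, ?_⟩
  · have h1 : k + (r - l) + 1 = k + (r + 1 - l) := by omega
    rw [h1, htk, htd, List.take_append_drop, hul]
    omega
  · have h1 : k + (r - l) + 1 = k + (r + 1 - l) := by omega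
    have h2 : k + (r + 1 - l) - k = r + 1 - l := by omega
    rw [h1, h2, htk, htd, htm, List.take_append_drop]
    have hu1 : u.take l = s.take l := by
      rw [hu]; exact List.take_left' (by rw [List.length_take]; omega)
    have hu2 : u.drop l = s.drop (r + 1) := by
      rw [hu]; exact List.drop_left' (by rw [List.length_take]; omega)
    rw [hu1, hu2]
    have : r + 1 = l + (r + 1 - l) := by omega
    rw [this, split3]

-- reachability in exactly d block moves (with a reflexive move, "within d" as well)
def Reach (n : Nat) : Nat → List Int → List Int → Prop
  | 0, s, t => t = s
  | d + 1, s, t => ∃ u, Reach n d s u ∧ t ∈ nxtA n u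

lemma reach_length {n : Nat} {s : List Int} (hs : s.length = n) :
    ∀ {d : Nat} {t : List Int}, Reach n d s t → t.length = n := by
  intro d
  induction d with
  | zero => intro t h; rw [show t = s from h]; exact hs
  | succ d ih =>
    intro t h
    obtain ⟨u, hu, hst⟩ := h
    exact length_of_mem_nxtA n u t (ih hu) hst

lemma reach_perm {n : Nat} {s : List Int} :
    ∀ {d : Nat} {t : List Int}, Reach n d s t → t.Perm s := by
  intro d
  induction d with
  | zero => intro t h; rw [show t = s from h]
  | succ d ih =>
    intro t h
    obtain ⟨u, hu, hst⟩ := h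
    exact (perm_of_mem_nxtA n u t hst).trans (ih hu)

lemma reach_refl {n : Nat} (hn : 0 < n) {s : List Int} (hs : s.length = n) :
    ∀ d, Reach n d s s := by
  intro d
  induction d with
  | zero => rfl
  | succ d ih => exact ⟨s, ih, nxtA_self n s hn hs⟩

lemma reach_mono {n : Nat} (hn : 0 < n) {s : List Int} (hs : s.length = n) :
    ∀ {d : Nat} {t : List Int}, Reach n d s t → Reach n (d + 1) s t := by
  intro d
  induction d with
  | zero =>
    intro t h
    have h' : t = s := h
    subst h'
    exact ⟨t, rfl, nxtA_self n t hn hs⟩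
  | succ d ih =>
    intro t h
    obtain ⟨u, hu, hst⟩ := h
    exact ⟨u, ih hu, hst⟩

lemma reach_le {n : Nat} (hn : 0 < n) {s : List Int} (hs : s.length = n)
    {d e : Nat} (hde : d ≤ e) {t : List Int} (h : Reach n d s t) : Reach n e s t := by
  induction e, hde using Nat.le_induction with
  | base => exact h
  | succ e _ ih => exact reach_mono hn hs ih

lemma reach_comp {n : Nat} {i j : Nat} {s t : List Int} :
    Reach n (i + j) s t ↔ ∃ u, Reach n i s u ∧ Reach n j u t := by
  induction j generalizing t with
  | zero =>
    constructor
    · intro h; exact ⟨t, h, rfl⟩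
    · rintro ⟨u, h, rfl⟩; exact h
  | succ j ih =>
    constructor
    · rintro ⟨v, hv, hst⟩
      obtain ⟨u, h1, h2⟩ := ih.mp hv
      exact ⟨u, h1, v, h2, hst⟩
    · rintro ⟨u, h1, v, h2, hst⟩
      exact ⟨v, ih.mpr ⟨u, h1, h2⟩, hst⟩

lemma reach_symm {n : Nat} {s : List Int} (hs : s.length = n) :
    ∀ {d : Nat} {t : List Int}, Reach n d s t → Reach n d t s := by
  intro d
  induction d with
  | zero => intro t h; exact (show t = s from h) ▸ rfl
  | succ d ih =>
    intro t h
    obtain ⟨u, hu, hst⟩ := h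
    have hul : u.length = n := reach_length hs hu
    have hus : Reach n d u s := ih hu
    have hstu : u ∈ nxtA n t := mem_nxtA_symm n u t hul hst
    have : Reach n (1 + d) t s := reach_comp.mpr ⟨u, ⟨t, rfl, hstu⟩, hus⟩
    rwa [Nat.add_comm] at this

lemma reach_stab {n : Nat} {a : List Int} {d : Nat}
    (hstab : ∀ t, Reach n (d + 1) a t → Reach n d a t) :
    ∀ (m : Nat) (t : List Int), Reach n (d + m) a t → Reach n d a t := by
  intro m
  induction m with
  | zero => intro t h; exact h
  | succ m ih =>
    intro t h
    obtain ⟨u, hu, hst⟩ := h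
    exact hstab t ⟨u, ih u hu, hst⟩

-- the value both programs compute: the least number of moves, or -1 if unreachable
noncomputable def specAns (n : Nat) (src tgt : List Int) : Int := by
  classical
  exact if h : ∃ d, Reach n d src tgt then ((Nat.find h : Nat) : Int) else -1

lemma specAns_eq {n : Nat} {src tgt : List Int} {d : Nat}
    (hd : Reach n d src tgt) (hmin : ∀ e < d, ¬ Reach n e src tgt) :
    specAns n src tgt = (d : Int) := by
  classical
  unfold specAns
  have h : ∃ e, Reach n e src tgt := ⟨d, hd⟩
  rw [dif_pos h]
  have hfind : Nat.find h = d := (Nat.find_eq_iff h).mpr ⟨hd, fun e he => hmin e he⟩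
  exact_mod_cast hfind

lemma specAns_neg {n : Nat} {src tgt : List Int}
    (h : ∀ e, ¬ Reach n e src tgt) : specAns n src tgt = -1 := by
  unfold specAns
  rw [dif_neg (by simpa using h)]

-- a duplicate-free collection of permutations of a has at most |a|! elements
lemma nodup_perm_length_le (v : List (List Int)) (a : List Int) (hnd : v.Nodup)
    (hperm : ∀ t ∈ v, t.Perm a) : v.length ≤ a.length.factorial := by
  have hsub : v ⊆ a.permutations := fun t ht => List.mem_permutations.mpr (hperm t ht)
  have := (hnd.subperm hsub).length_le
  simpa [List.length_permutations] using this

-- pushA: membership of the produced queue tail and visited set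
lemma pushA_mem (ts : List (List Int)) : ∀ (acc : List (List Int)) (visit : PySem.Set (List Int)) (t : List Int),
    (t ∈ (pushA ts acc visit).1 ↔ t ∈ acc ∨ (t ∈ ts ∧ t ∉ visit)) ∧
    (t ∈ (pushA ts acc visit).2 ↔ t ∈ visit ∨ t ∈ ts) := by
  induction ts with
  | nil => intro acc visit t; simp [pushA]
  | cons h rest ih =>
    intro acc visit t
    simp only [pushA]
    by_cases hmem : h ∈ visit
    · rw [if_pos (by simpa [PySem.Set.contains_iff] using hmem)]
      obtain ⟨ih1, ih2⟩ := ih acc visit t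
      constructor
      · rw [ih1]; constructor
        · rintro (h1 | ⟨h2, h3⟩)
          · exact Or.inl h1
          · exact Or.inr ⟨List.mem_cons_of_mem _ h2, h3⟩
        · rintro (h1 | ⟨h2, h3⟩)
          · exact Or.inl h1
          · rcases List.mem_cons.mp h2 with rfl | h2
            · exact absurd hmem h3
            · exact Or.inr ⟨h2, h3⟩
      · rw [ih2]; constructor
        · rintro (h1 | h2)
          · exact Or.inl h1
          · exact Or.inr (List.mem_cons_of_mem _ h2)
        · rintro (h1 | h2)
          · exact Or.inl h1
          · rcases List.mem_cons.mp h2 with rfl | h2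
            · exact Or.inl hmem
            · exact Or.inr h2
    · rw [if_neg (by simpa [PySem.Set.contains_iff] using hmem)]
      obtain ⟨ih1, ih2⟩ := ih (acc ++ [h]) (PySem.Set.add visit h) t
      constructor
      · rw [ih1]
        simp only [List.mem_append, PySem.Set.mem_add, List.mem_cons]
        by_cases ht : t = h <;> simp [ht, hmem]
      · rw [ih2]
        simp only [PySem.Set.mem_add, List.mem_cons]
        tauto

-- proof-side total form of one BFS level of A
def levelA' (n : Nat) : List (List Int) → List (List Int) → PySem.Set (List Int) → List (List Int) × PySem.Set (List Int)
  | [], acc, visit => (acc, visit)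
  | s :: rest, acc, visit =>
    let p := pushA (nxtA n s) acc visit
    levelA' n rest p.1 p.2

lemma levelA_eq (n : Nat) (nums2 : List Int) (dq : List (List Int)) : ∀ (acc : List (List Int)) (visit : PySem.Set (List Int)),
    levelA n nums2 dq acc visit = if nums2 ∈ dq then none else some (levelA' n dq acc visit) := by
  induction dq with
  | nil => intro acc visit; simp [levelA, levelA']
  | cons s rest ih =>
    intro acc visit
    simp only [levelA, levelA', List.mem_cons]
    by_cases hs : s = nums2
    · subst hs; simp
    · rw [if_neg hs, ih]
      by_cases hr : nums2 ∈ rest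
      · simp [hr]
      · simp [hr, Ne.symm hs]

lemma levelA'_mem (n : Nat) (dq : List (List Int)) : ∀ (acc : List (List Int)) (visit : PySem.Set (List Int)) (t : List Int),
    (t ∈ (levelA' n dq acc visit).1 ↔ t ∈ acc ∨ ((∃ s ∈ dq, t ∈ nxtA n s) ∧ t ∉ visit)) ∧
    (t ∈ (levelA' n dq acc visit).2 ↔ t ∈ visit ∨ ∃ s ∈ dq, t ∈ nxtA n s) := by
  induction dq with
  | nil => intro acc visit t; simp [levelA']
  | cons s rest ih =>
    intro acc visit t
    simp only [levelA']
    obtain ⟨ih1, ih2⟩ := ih (pushA (nxtA n s) acc visit).1 (pushA (nxtA n s) acc visit).2 t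
    obtain ⟨p1, p2⟩ := pushA_mem (nxtA n s) acc visit t
    constructor
    · rw [ih1, p1, p2]
      simp only [List.mem_cons]
      constructor
      · rintro ((h | ⟨h1, h2⟩) | ⟨⟨u, hu, htu⟩, h3⟩)
        · exact Or.inl h
        · exact Or.inr ⟨⟨s, Or.inl rfl, h1⟩, h2⟩
        · have h4 : t ∉ visit := fun hv => h3 (Or.inl hv)
          have h5 : t ∉ nxtA n s := fun hn => h3 (Or.inr hn)
          exact Or.inr ⟨⟨u, Or.inr hu, htu⟩, h4⟩
      · rintro (h | ⟨⟨u, hu, htu⟩, h2⟩)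
        · exact Or.inl (Or.inl h)
        · rcases hu with rfl | hu
          · exact Or.inl (Or.inr ⟨htu, h2⟩)
          · by_cases h5 : t ∈ nxtA n s
            · exact Or.inl (Or.inr ⟨h5, h2⟩)
            · exact Or.inr ⟨⟨u, hu, htu⟩, fun hc => hc.elim h2 h5⟩
    · rw [ih2, p2]
      simp only [List.mem_cons]
      constructor
      · rintro ((h | h) | ⟨u, hu, htu⟩)
        · exact Or.inl h
        · exact Or.inr ⟨s, Or.inl rfl, h⟩
        · exact Or.inr ⟨u, Or.inr hu, htu⟩
      · rintro (h | ⟨u, hu, htu⟩)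
        · exact Or.inl (Or.inl h)
        · rcases hu with rfl | hu
          · exact Or.inl (Or.inr htu)
          · exact Or.inr ⟨u, hu, htu⟩

-- proof-side reference: A's BFS with the frontier and visited kept as sets
def refLoop (n : Nat) (nums2 : List Int) : Nat → PySem.Set (List Int) → PySem.Set (List Int) → Int → Int
  | 0, _, _, _ => -1
  | fuel + 1, frontier, visited, steps =>
    if frontier.isEmpty then -1
    else if PySem.Set.contains frontier nums2 then steps
    else
      let f' := PySem.Set.diff (PySem.Set.ofList (frontier.flatMap fun s => movesB n s)) visited
      refLoop n nums2 fuel f' (PySem.Set.union visited f') (steps + 1)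

-- A's deque BFS agrees with the reference whenever queue/frontier and visited agree as sets
lemma loop_eq (n : Nat) (nums2 : List Int) : ∀ (fuel : Nat) (dq frontier : List (List Int)) (visit visited : PySem.Set (List Int)) (ans : Int),
    (∀ t, t ∈ dq ↔ t ∈ frontier) → (∀ t, t ∈ visit ↔ t ∈ visited) → (∀ s ∈ dq, s.length = n) →
    loopA n nums2 fuel dq visit ans = refLoop n nums2 fuel frontier visited ans := by
  intro fuel
  induction fuel with
  | zero => intro dq frontier visit visited ans _ _ _; rfl
  | succ fuel ih =>
    intro dq frontier visit visited ans hfr hvis hlen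
    simp only [loopA, refLoop]
    by_cases hdq : dq = []
    · subst hdq
      have : frontier = [] := by
        apply List.eq_nil_iff_forall_not_mem.mpr
        intro t ht
        exact absurd ((hfr t).mpr ht) (by simp)
      simp [this]
    · have hne : frontier ≠ [] := by
        obtain ⟨s, hs⟩ := List.exists_mem_of_ne_nil dq hdq
        intro h
        rw [h] at hfr
        simpa using (hfr s).mp hs
      have hfe : frontier.isEmpty = false := by
        cases hfeb : frontier.isEmpty
        · rfl
        · exact absurd (List.isEmpty_iff.mp hfeb) hne
      rw [if_neg hdq, hfe]
      simp only [Bool.false_eq_true, if_false]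
      rw [levelA_eq]
      by_cases hfound : nums2 ∈ dq
      · have hct : PySem.Set.contains frontier nums2 = true := (PySem.Set.contains_iff _ _).mpr ((hfr nums2).mp hfound)
        rw [if_pos hfound, hct]
        rfl
      · have hcf : PySem.Set.contains frontier nums2 = false := by
          cases hc : PySem.Set.contains frontier nums2
          · rfl
          · exact absurd ((hfr nums2).mpr ((PySem.Set.contains_iff _ _).mp hc)) hfound
        rw [if_neg hfound, hcf]
        simp only [Bool.false_eq_true, if_false]
        have hmem := levelA'_mem n dq [] visit
        apply ih
        · intro t
          rw [(hmem t).1]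
          simp only [List.not_mem_nil, false_or, PySem.Set.mem_diff, PySem.Set.mem_ofList, List.mem_flatMap]
          constructor
          · rintro ⟨⟨s, hs, htn⟩, hv⟩
            exact ⟨⟨s, (hfr s).mp hs, (mem_movesB n s t (hlen s hs)).mpr htn⟩, fun h => hv ((hvis t).mpr h)⟩
          · rintro ⟨⟨s, hs, htn⟩, hv⟩
            have hs' := (hfr s).mpr hs
            exact ⟨⟨s, hs', (mem_movesB n s t (hlen s hs')).mp htn⟩, fun h => hv ((hvis t).mp h)⟩
        · intro t
          rw [(hmem t).2]
          simp only [PySem.Set.mem_union, PySem.Set.mem_diff, PySem.Set.mem_ofList, List.mem_flatMap]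
          constructor
          · rintro (hv | ⟨s, hs, htn⟩)
            · exact Or.inl ((hvis t).mp hv)
            · by_cases hv : t ∈ visited
              · exact Or.inl hv
              · exact Or.inr ⟨⟨s, (hfr s).mp hs, (mem_movesB n s t (hlen s hs)).mpr htn⟩, hv⟩
          · rintro (hv | ⟨⟨s, hs, htn⟩, _⟩)
            · exact Or.inl ((hvis t).mpr hv)
            · have hs' := (hfr s).mpr hs
              exact Or.inr ⟨s, hs', (mem_movesB n s t (hlen s hs')).mp htn⟩
        · intro t ht
          rw [(hmem t).1] at ht
          rcases ht with h | ⟨⟨s, hs, htn⟩, _⟩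
          · exact absurd h (List.not_mem_nil)
          · exact length_of_mem_nxtA n s t (hlen s hs) htn

-- the reference loop computes specAns
lemma refLoop_correct (n : Nat) (src tgt : List Int) (hn : 0 < n) (hs : src.length = n) :
    ∀ (fuel : Nat) (frontier visited : PySem.Set (List Int)) (d : Nat),
      visited.Nodup →
      (∀ t, t ∈ frontier ↔ (Reach n d src t ∧ ∀ e < d, ¬ Reach n e src t)) →
      (∀ t, t ∈ visited ↔ Reach n d src t) →
      (∀ e < d, ¬ Reach n e src tgt) →
      (frontier = [] → 1 ≤ fuel) →
      (frontier ≠ [] → n.factorial + 2 ≤ fuel + visited.length) →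
      refLoop n tgt fuel frontier visited (d : Int) = specAns n src tgt := by
  intro fuel
  induction fuel with
  | zero =>
    intro frontier visited d hnd h1 h2 h3 h4 h5
    exfalso
    by_cases hfe : frontier = []
    · exact absurd (h4 hfe) (by omega)
    · have hb := h5 hfe
      have hv : visited.length ≤ n.factorial := by
        have he : n.factorial = src.length.factorial := by rw [hs]
        rw [he]
        exact nodup_perm_length_le visited src hnd (fun t ht => reach_perm ((h2 t).mp ht))
      omega
  | succ fuel ih =>
    intro frontier visited d hnd h1 h2 h3 h4 h5
    have hvle : visited.length ≤ n.factorial := by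
      have he : n.factorial = src.length.factorial := by rw [hs]
      rw [he]
      exact nodup_perm_length_le visited src hnd (fun t ht => reach_perm ((h2 t).mp ht))
    simp only [refLoop]
    by_cases hfe : frontier = []
    · subst hfe
      simp only [List.isEmpty_nil, if_true]
      rcases d with _ | e
      · exact absurd ((h1 src).mpr ⟨rfl, fun e he => absurd he (Nat.not_lt_zero e)⟩)
          List.not_mem_nil
      · have hstab : ∀ t, Reach n (e + 1) src t → Reach n e src t := by
          intro t hR
          have hnotin : t ∉ ([] : List (List Int)) := List.not_mem_nil
          rw [h1 t] at hnotin
          obtain ⟨e', he', hRe'⟩ : ∃ e' < e + 1, Reach n e' src t := by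
            by_contra hcon
            push_neg at hcon
            exact hnotin ⟨hR, hcon⟩
          exact reach_le hn hs (by omega : e' ≤ e) hRe'
        refine (specAns_neg ?_).symm
        intro e' hRe'
        rcases Nat.lt_or_ge e e' with h | h
        · have : Reach n e src tgt :=
            reach_stab hstab (e' - e) tgt (by rwa [show e + (e' - e) = e' from by omega])
          exact h3 e (by omega) this
        · exact h3 e' (by omega) hRe'
    · have hfeb : frontier.isEmpty = false := by
        cases hfeb : frontier.isEmpty
        · rfl
        · exact absurd (List.isEmpty_iff.mp hfeb) hfe
      rw [hfeb]
      simp only [Bool.false_eq_true, if_false]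
      by_cases hft : tgt ∈ frontier
      · have hct : PySem.Set.contains frontier tgt = true :=
          (PySem.Set.contains_iff _ _).mpr hft
        rw [if_pos hct]
        obtain ⟨hRd, hmin⟩ := (h1 tgt).mp hft
        exact (specAns_eq hRd (fun e he => hmin e he)).symm
      · have hct : ¬ (PySem.Set.contains frontier tgt = true) := by
          rw [PySem.Set.contains_iff]
          exact hft
        rw [if_neg hct]
        have hfr_len : ∀ s ∈ frontier, s.length = n :=
          fun s hs' => reach_length hs ((h1 s).mp hs').1
        have hndtgt : ¬ Reach n d src tgt := fun hR => hft ((h1 tgt).mpr ⟨hR, h3⟩)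
        have h3' : ∀ e < d + 1, ¬ Reach n e src tgt := by
          intro e he
          rcases Nat.lt_or_ge e d with h | h
          · exact h3 e h
          · have heq : e = d := by omega
            exact heq ▸ hndtgt
        set f' := PySem.Set.diff (PySem.Set.ofList (frontier.flatMap fun s => movesB n s)) visited with hf'
        have hf'mem : ∀ t, t ∈ f' ↔ (Reach n (d + 1) src t ∧ ∀ e < d + 1, ¬ Reach n e src t) := by
          intro t
          rw [hf', PySem.Set.mem_diff, PySem.Set.mem_ofList, List.mem_flatMap]
          constructor
          · rintro ⟨⟨s', hs', hmv⟩, hnv⟩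
            have hR : Reach n (d + 1) src t :=
              ⟨s', ((h1 s').mp hs').1, (mem_movesB n s' t (hfr_len s' hs')).mp hmv⟩
            refine ⟨hR, ?_⟩
            intro e he hRe
            have hRd' : Reach n d src t := reach_le hn hs (by omega) hRe
            exact hnv ((h2 t).mpr hRd')
          · rintro ⟨⟨u, hu, hst⟩, hmin⟩
            have huf : u ∈ frontier := by
              refine (h1 u).mpr ⟨hu, ?_⟩
              intro e he hRe
              exact hmin (e + 1) (by omega) ⟨u, hRe, hst⟩
            have hul : u.length = n := reach_length hs hu
            refine ⟨⟨u, huf, (mem_movesB n u t hul).mpr hst⟩, ?_⟩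
            intro hv
            exact hmin d (by omega) ((h2 t).mp hv)
        have hvis' : ∀ t, t ∈ PySem.Set.union visited f' ↔ Reach n (d + 1) src t := by
          intro t
          rw [PySem.Set.mem_union]
          constructor
          · rintro (hv | hv)
            · exact reach_mono hn hs ((h2 t).mp hv)
            · exact ((hf'mem t).mp hv).1
          · intro hR
            by_cases hv : Reach n d src t
            · exact Or.inl ((h2 t).mpr hv)
            · refine Or.inr ((hf'mem t).mpr ⟨hR, ?_⟩)
              intro e he hRe
              exact hv (reach_le hn hs (by omega) hRe)
        have hnd' : (PySem.Set.union visited f').Nodup := PySem.Set.nodup_union visited f' hnd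
        have hcast : ((d : Int) + 1) = ((d + 1 : Nat) : Int) := by push_cast; ring
        rw [hcast]
        by_cases hf'e : f' = []
        · have hfu : 1 ≤ fuel := by
            have := h5 hfe
            omega
          exact ih f' (PySem.Set.union visited f') (d + 1) hnd' hf'mem hvis' h3'
            (fun _ => hfu) (fun hne => absurd hf'e hne)
        · have hgrow : visited.length + 1 ≤ (PySem.Set.union visited f').length := by
            have hf'nd : f'.Nodup := PySem.Set.nodup_diff _ _ (PySem.Set.nodup_ofList _)
            have hdisj : ∀ x ∈ f', x ∉ visited := by
              intro x hx
              rw [hf'] at hx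
              exact ((PySem.Set.mem_diff _ _ _).mp hx).2
            have hun : PySem.Set.union visited f' = visited ++ f' :=
              PySem.Set.update_eq_append_of_disjoint visited f' hf'nd hdisj
            rw [hun, List.length_append]
            have hpos : 0 < f'.length := List.length_pos_of_ne_nil hf'e
            omega
          refine ih f' (PySem.Set.union visited f') (d + 1) hnd' hf'mem hvis' h3'
            (fun h => absurd h hf'e) (fun _ => ?_)
          have := h5 hfe
          omega

-- set-building helpers for B's expand
lemma foldl_add_prefix (l : List (List Int)) : ∀ s : PySem.Set (List Int),
    ∃ e, l.foldl PySem.Set.add s = s ++ e := by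
  induction l with
  | nil => exact fun s => ⟨[], by simp⟩
  | cons x xs ih =>
    intro s
    simp only [List.foldl_cons]
    by_cases hx : x ∈ s
    · rw [PySem.Set.add_of_mem hx]
      exact ih s
    · rw [PySem.Set.add_of_not_mem hx]
      obtain ⟨e, he⟩ := ih (s ++ [x])
      exact ⟨x :: e, by rw [he, List.append_assoc]; rfl⟩

lemma foldl_add_nodup (l : List (List Int)) : ∀ s : PySem.Set (List Int),
    s.Nodup → (l.foldl PySem.Set.add s).Nodup := by
  induction l with
  | nil => exact fun s h => h
  | cons x xs ih =>
    intro s hnd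
    exact ih _ (PySem.Set.nodup_add s x hnd)

lemma foldl_expand_prefix (n : Nat) (l : List (List Int)) :
    ∀ s : PySem.Set (List Int),
      ∃ e, l.foldl (fun out x => (movesB n x).foldl PySem.Set.add out) s = s ++ e := by
  induction l with
  | nil => exact fun s => ⟨[], by simp⟩
  | cons x xs ih =>
    intro s
    simp only [List.foldl_cons]
    obtain ⟨e1, he1⟩ := foldl_add_prefix (movesB n x) s
    obtain ⟨e2, he2⟩ := ih ((movesB n x).foldl PySem.Set.add s)
    exact ⟨e1 ++ e2, by rw [he2, he1, List.append_assoc]⟩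

lemma expandB_prefix (n : Nat) (ball : PySem.Set (List Int)) :
    ∃ e, expandB n ball = ball ++ e :=
  foldl_expand_prefix n ball ball

lemma mem_foldl_add' (l : List (List Int)) : ∀ (s : PySem.Set (List Int)) (t : List Int),
    t ∈ l.foldl PySem.Set.add s ↔ t ∈ s ∨ t ∈ l := by
  intro s t
  simpa using PySem.Set.mem_foldl_add l id s t

lemma mem_foldl_expand (n : Nat) (l : List (List Int)) :
    ∀ (s : PySem.Set (List Int)) (t : List Int),
      t ∈ l.foldl (fun out x => (movesB n x).foldl PySem.Set.add out) s ↔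
        t ∈ s ∨ ∃ x ∈ l, t ∈ movesB n x := by
  induction l with
  | nil => intro s t; simp
  | cons x xs ih =>
    intro s t
    simp only [List.foldl_cons, List.mem_cons]
    rw [ih, mem_foldl_add']
    constructor
    · rintro ((h | h) | ⟨y, hy, hty⟩)
      · exact Or.inl h
      · exact Or.inr ⟨x, Or.inl rfl, h⟩
      · exact Or.inr ⟨y, Or.inr hy, hty⟩
    · rintro (h | ⟨y, hy | hy, hty⟩)
      · exact Or.inl (Or.inl h)
      · exact Or.inl (Or.inr (hy ▸ hty))
      · exact Or.inr ⟨y, hy, hty⟩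

lemma mem_expandB (n : Nat) (ball : PySem.Set (List Int)) (t : List Int) :
    t ∈ expandB n ball ↔ t ∈ ball ∨ ∃ s ∈ ball, t ∈ movesB n s :=
  mem_foldl_expand n ball ball t

lemma foldl_expand_nodup (n : Nat) (l : List (List Int)) :
    ∀ s : PySem.Set (List Int), s.Nodup →
      (l.foldl (fun out x => (movesB n x).foldl PySem.Set.add out) s).Nodup := by
  induction l with
  | nil => exact fun s h => h
  | cons x xs ih =>
    intro s h
    simp only [List.foldl_cons]
    exact ih _ (foldl_add_nodup (movesB n x) s h)

lemma nodup_expandB (n : Nat) (ball : PySem.Set (List Int)) (h : ball.Nodup) :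
    (expandB n ball).Nodup :=
  foldl_expand_nodup n ball ball h

-- the intersection test: Python's "if front & back:"
lemma inter_isEmpty_iff (front back : PySem.Set (List Int)) :
    (PySem.Set.inter front back).isEmpty = true ↔ ∀ t, ¬ (t ∈ front ∧ t ∈ back) := by
  rw [List.isEmpty_iff, List.eq_nil_iff_forall_not_mem]
  constructor
  · intro h t ht
    exact h t ((PySem.Set.mem_inter _ _ _).mpr ht)
  · intro h t ht
    exact h t ((PySem.Set.mem_inter _ _ _).mp ht)

-- B's bidirectional loop computes specAns (both endpoints of length n)
lemma loopBid_correct (n : Nat) (src tgt : List Int) (hn : 0 < n)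
    (hs : src.length = n) (ht : tgt.length = n) :
    ∀ (fuel : Nat) (front back : PySem.Set (List Int)) (p q : Nat) (a b : List Int),
      ((a = src ∧ b = tgt) ∨ (a = tgt ∧ b = src)) →
      front.Nodup → back.Nodup →
      (∀ t, t ∈ front ↔ Reach n p a t) →
      (∀ t, t ∈ back ↔ Reach n q b t) →
      (∀ e < p + q, ¬ Reach n e src tgt) →
      2 * n.factorial + 3 ≤ fuel + front.length + back.length →
      loopBid n fuel front back ((p + q : Nat) : Int) = specAns n src tgt := by
  intro fuel
  induction fuel with
  | zero =>
    intro front back p q a b hab hndf hndb hf hb hmin hfuel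
    exfalso
    have hal : a.length = n := by rcases hab with ⟨h, _⟩ | ⟨h, _⟩ <;> rw [h] <;> assumption
    have hbl : b.length = n := by rcases hab with ⟨_, h⟩ | ⟨_, h⟩ <;> rw [h] <;> assumption
    have hflen : front.length ≤ n.factorial := by
      have := nodup_perm_length_le front a hndf (fun t ht' => reach_perm ((hf t).mp ht'))
      rwa [hal] at this
    have hblen : back.length ≤ n.factorial := by
      have := nodup_perm_length_le back b hndb (fun t ht' => reach_perm ((hb t).mp ht'))
      rwa [hbl] at this
    omega
  | succ fuel ih =>
    intro front back p q a b hab hndf hndb hf hb hmin hfuel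
    have hal : a.length = n := by rcases hab with ⟨h, _⟩ | ⟨h, _⟩ <;> rw [h] <;> assumption
    have hbl : b.length = n := by rcases hab with ⟨_, h⟩ | ⟨_, h⟩ <;> rw [h] <;> assumption
    have hRiff : ∀ e, Reach n e a b ↔ Reach n e src tgt := by
      intro e
      rcases hab with ⟨h1, h2⟩ | ⟨h1, h2⟩ <;> subst h1 <;> subst h2
      · exact Iff.rfl
      · exact ⟨fun h => reach_symm ht h, fun h => reach_symm hs h⟩
    have hmeetIff : (∃ t, t ∈ front ∧ t ∈ back) ↔ Reach n (p + q) a b := by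
      constructor
      · rintro ⟨t, htf, htb⟩
        exact reach_comp.mpr ⟨t, (hf t).mp htf, reach_symm hbl ((hb t).mp htb)⟩
      · intro h
        obtain ⟨u, h1, h2⟩ := reach_comp.mp h
        exact ⟨u, (hf u).mpr h1, (hb u).mpr (reach_symm (reach_length hal h1) h2)⟩
    simp only [loopBid]
    by_cases hmeet : ∃ t, t ∈ front ∧ t ∈ back
    · have hne : ¬ ((PySem.Set.inter front back).isEmpty = true) := by
        rw [inter_isEmpty_iff]
        push_neg
        obtain ⟨t, ht1, ht2⟩ := hmeet
        exact ⟨t, ht1, ht2⟩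
      rw [if_neg hne]
      exact (specAns_eq ((hRiff (p + q)).mp (hmeetIff.mp hmeet)) hmin).symm
    · have hemp : (PySem.Set.inter front back).isEmpty = true := by
        rw [inter_isEmpty_iff]
        exact fun t ht' => hmeet ⟨t, ht'⟩
      rw [if_pos hemp]
      have hnR : ¬ Reach n (p + q) src tgt := fun h => hmeet (hmeetIff.mpr ((hRiff (p + q)).mpr h))
      have hmin' : ∀ e < p + q + 1, ¬ Reach n e src tgt := by
        intro e he
        rcases Nat.lt_or_ge e (p + q) with h | h
        · exact hmin e h
        · have heq : e = p + q := by omega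
          exact heq ▸ hnR
      have hnwmem : ∀ t, t ∈ expandB n front ↔ Reach n (p + 1) a t := by
        intro t
        rw [mem_expandB]
        constructor
        · rintro (h | ⟨s', hs', hmv⟩)
          · exact reach_mono hn hal ((hf t).mp h)
          · have hsl : s'.length = n := reach_length hal ((hf s').mp hs')
            exact ⟨s', (hf s').mp hs', (mem_movesB n s' t hsl).mp hmv⟩
        · rintro ⟨u, hu, hst⟩
          exact Or.inr ⟨u, (hf u).mpr hu, (mem_movesB n u t (reach_length hal hu)).mpr hst⟩
      by_cases hlen : (expandB n front).length = front.length
      · rw [if_pos hlen]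
        obtain ⟨e, he⟩ := expandB_prefix n front
        have he0 : e = [] := by
          have hl2 := congrArg List.length he
          rw [List.length_append] at hl2
          have : e.length = 0 := by omega
          exact List.length_eq_zero_iff.mp this
        rw [he0, List.append_nil] at he
        have hstab : ∀ t, Reach n (p + 1) a t → Reach n p a t := by
          intro t hR
          have hmem : t ∈ expandB n front := (hnwmem t).mpr hR
          rw [he] at hmem
          exact (hf t).mp hmem
        refine (specAns_neg ?_).symm
        intro e' hRe'
        have hRab : Reach n e' a b := (hRiff e').mpr hRe'
        have hRp : Reach n p a b := by
          rcases Nat.lt_or_ge p e' with h | h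
          · exact reach_stab hstab (e' - p) b (by rwa [show p + (e' - p) = e' from by omega])
          · exact reach_le hn hal h hRab
        exact hmeet ⟨b, (hf b).mpr hRp, (hb b).mpr (reach_refl hn hbl q)⟩
      · rw [if_neg hlen]
        have hnwnd : (expandB n front).Nodup := nodup_expandB n front hndf
        have hgrow : front.length + 1 ≤ (expandB n front).length := by
          obtain ⟨e, he⟩ := expandB_prefix n front
          have hl2 := congrArg List.length he
          rw [List.length_append] at hl2
          omega
        have harg : ((p + q : Nat) : Int) + 1 = ((q + (p + 1) : Nat) : Int) := by
          push_cast
          ring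
        rw [harg]
        refine ih back (expandB n front) q (p + 1) b a ?_ hndb hnwnd hb hnwmem ?_ (by omega)
        · tauto
        · intro e he
          exact hmin' e (by omega)

-- B's bidirectional loop on two different multiset classes: always -1
lemma loopBid_neg (n : Nat) (src tgt : List Int) (hnp : ¬ src.Perm tgt) :
    ∀ (fuel : Nat) (front back : PySem.Set (List Int)) (d : Int) (a b : List Int),
      ((a = src ∧ b = tgt) ∨ (a = tgt ∧ b = src)) →
      front.Nodup → back.Nodup →
      (∀ t ∈ front, t.Perm a) → (∀ t ∈ back, t.Perm b) →
      loopBid n fuel front back d = -1 := by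
  intro fuel
  induction fuel with
  | zero => intro front back d a b _ _ _ _ _; rfl
  | succ fuel ih =>
    intro front back d a b hab hndf hndb hf hb
    have hnab : ∀ t, ¬ (t ∈ front ∧ t ∈ back) := by
      rintro t ⟨h1, h2⟩
      have hp : a.Perm b := (hf t h1).symm.trans (hb t h2)
      rcases hab with ⟨ha, hb'⟩ | ⟨ha, hb'⟩ <;> subst ha <;> subst hb'
      · exact hnp hp
      · exact hnp hp.symm
    simp only [loopBid]
    rw [if_pos ((inter_isEmpty_iff front back).mpr hnab)]
    by_cases hlen : (expandB n front).length = front.length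
    · rw [if_pos hlen]
    · rw [if_neg hlen]
      refine ih back (expandB n front) (d + 1) b a (by tauto) hndb
        (nodup_expandB n front hndf) hb ?_
      intro t ht'
      rcases (mem_expandB n front t).mp ht' with h | ⟨s', hs', hmv⟩
      · exact hf t h
      · exact (perm_of_mem_movesB n s' t hmv).trans (hf s' hs')

-- ===== VERDICT (by name: the statement is the Claim_ definition above) =====
theorem minSplitMerge_spec : Claim_equal_minSplitMerge := by
  intro nums1 nums2 _
  show minSplitMerge nums1 nums2 = minSplitMerge_alt nums1 nums2
  rcases eq_or_ne nums1 [] with h1 | h1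
  · subst h1
    rcases eq_or_ne nums2 [] with h2 | h2
    · subst h2
      decide
    · have hA : minSplitMerge [] nums2 = -1 := by
        simp [minSplitMerge, loopA, levelA, pushA, nxtA, (Ne.symm h2 : ([] : List Int) ≠ nums2)]
      have hnp : ¬ ([] : List Int).Perm nums2 := fun hp => h2 hp.symm.eq_nil
      have hB : minSplitMerge_alt [] nums2 = -1 := by
        simp only [minSplitMerge_alt]
        refine loopBid_neg 0 [] nums2 hnp _ _ _ _ [] nums2 (Or.inl ⟨rfl, rfl⟩)
          (PySem.Set.nodup_ofList _) (PySem.Set.nodup_ofList _) ?_ ?_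
        · intro t ht'
          rw [PySem.Set.mem_ofList, List.mem_singleton] at ht'
          exact ht' ▸ List.Perm.refl _
        · intro t ht'
          rw [PySem.Set.mem_ofList, List.mem_singleton] at ht'
          exact ht' ▸ List.Perm.refl _
      rw [hA, hB]
  · have hn : 0 < nums1.length := List.length_pos_of_ne_nil h1
    have hA : minSplitMerge nums1 nums2 = specAns nums1.length nums1 nums2 := by
      simp only [minSplitMerge]
      rw [loop_eq nums1.length nums2 (nums1.length.factorial + 2) [nums1]
        (PySem.Set.ofList [nums1]) (PySem.Set.ofList [nums1]) (PySem.Set.ofList [nums1]) 0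
        (fun t => by rw [PySem.Set.mem_ofList])
        (fun t => Iff.rfl)
        (fun s hsm => by rw [List.mem_singleton] at hsm; rw [hsm])]
      have h0 : (0 : Int) = ((0 : Nat) : Int) := by norm_num
      rw [h0]
      refine refLoop_correct nums1.length nums1 nums2 hn rfl _ _ _ 0
        (PySem.Set.nodup_ofList _) ?_ ?_ (fun e he => absurd he (Nat.not_lt_zero e)) ?_ ?_
      · intro t
        rw [PySem.Set.mem_ofList, List.mem_singleton]
        constructor
        · intro h
          exact ⟨h, fun e he => absurd he (Nat.not_lt_zero e)⟩
        · intro h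
          exact h.1
      · intro t
        rw [PySem.Set.mem_ofList, List.mem_singleton]
        exact Iff.rfl
      · intro habs
        have : nums1 ∈ PySem.Set.ofList [nums1] := by
          rw [PySem.Set.mem_ofList]
          exact List.mem_singleton.mpr rfl
        rw [habs] at this
        exact absurd this List.not_mem_nil
      · intro _
        omega
    have hB : minSplitMerge_alt nums1 nums2 = specAns nums1.length nums1 nums2 := by
      by_cases hp : nums1.Perm nums2
      · have ht : nums2.length = nums1.length := hp.length_eq.symm
        simp only [minSplitMerge_alt]
        have hsingle : ∀ (x : List Int) (t : List Int),
            t ∈ PySem.Set.ofList [x] ↔ t ∈ [x] := fun x t => PySem.Set.mem_ofList [x] t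
        have h0 : (0 : Int) = ((0 + 0 : Nat) : Int) := by norm_num
        rw [h0]
        refine loopBid_correct nums1.length nums1 nums2 hn rfl ht _ _ _ 0 0 nums1 nums2
          (Or.inl ⟨rfl, rfl⟩) (PySem.Set.nodup_ofList _) (PySem.Set.nodup_ofList _) ?_ ?_
          (fun e he => absurd he (Nat.not_lt_zero e)) ?_
        · intro t
          rw [hsingle, List.mem_singleton]
          exact Iff.rfl
        · intro t
          rw [hsingle, List.mem_singleton]
          exact Iff.rfl
        · rw [ht]
          omega
      · have hB1 : minSplitMerge_alt nums1 nums2 = -1 := by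
          simp only [minSplitMerge_alt]
          refine loopBid_neg nums1.length nums1 nums2 hp _ _ _ _ nums1 nums2
            (Or.inl ⟨rfl, rfl⟩) (PySem.Set.nodup_ofList _) (PySem.Set.nodup_ofList _) ?_ ?_
          · intro t ht'
            rw [PySem.Set.mem_ofList, List.mem_singleton] at ht'
            exact ht' ▸ List.Perm.refl _
          · intro t ht'
            rw [PySem.Set.mem_ofList, List.mem_singleton] at ht'
            exact ht' ▸ List.Perm.refl _
        have hS : specAns nums1.length nums1 nums2 = -1 :=
          specAns_neg (fun e hR => hp (reach_perm hR).symm)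
        rw [hB1, hS]
    rw [hA, hB]
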